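-- pv_equiv track=rewrite | github.com/UWPCE-PythonCert-ClassRepos/Self_Paced-Online | students/johnpharmd/lesson10/mailroom4fp.py | run_projection
-- ===== SOURCE A (Python) =====
-- donors_amts = {'Gates': {'title': 'Mr.', 'donations': 150000,
--                          'num_of_donations': 3},
--                'Brin': {'title': 'Mr.', 'donations': 150000,
--                         'num_of_donations': 3},
--                'Cerf': {'title': 'Mr.', 'donations': 50000,
--                         'num_of_donations': 2},
--                'Musk': {'title': 'Mr.', 'donations': 100000,
--                         'num_of_donations': 1},
--                'Berners-Lee': {'title': 'Mr.', 'donations':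
--                                50000, 'num_of_donations': 2},
--                'Wojcicki': {'title': 'Ms.', 'donations': 125000,
--                             'num_of_donations': 1},
--                'Avey': {'title': 'Ms.', 'donations': 200000,
--                         'num_of_donations': 2}}
--
-- def challenge(donations, factor):
--     return donations * factor
--
-- def run_projection(donor, contrib_ceiling=None, contrib_floor=None, factor=1):
--     """determines donor's total contribution if:
--     a) all contributions under x amount were doubled,
--     b) all contributions over x amount were tripled"""
--     factor_list = [factor for i in
--                    range(donors_amts[donor]['num_of_donations'])]
--     donations = [donors_amts[donor]['donations'] // len(factor_list) for
--                  factor in factor_list]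
--     if contrib_ceiling:
--         return sum(map(challenge, factor_list, filter(lambda x:
--                    x < contrib_ceiling, donations)))
--     elif contrib_floor:
--         return sum(map(challenge, factor_list, filter(lambda x:
--                    x >= contrib_floor, donations)))
-- ===== SOURCE B (Python) =====
-- donors_amts = {'Gates': {'title': 'Mr.', 'donations': 150000,
--                          'num_of_donations': 3},
--                'Brin': {'title': 'Mr.', 'donations': 150000,
--                         'num_of_donations': 3},
--                'Cerf': {'title': 'Mr.', 'donations': 50000,
--                         'num_of_donations': 2},
--                'Musk': {'title': 'Mr.', 'donations': 100000,
--                         'num_of_donations': 1},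
--                'Berners-Lee': {'title': 'Mr.', 'donations':
--                                50000, 'num_of_donations': 2},
--                'Wojcicki': {'title': 'Ms.', 'donations': 125000,
--                             'num_of_donations': 1},
--                'Avey': {'title': 'Ms.', 'donations': 200000,
--                         'num_of_donations': 2}}
--
--
-- def run_projection(donor, contrib_ceiling=None, contrib_floor=None, factor=1):
--     """Closed form: every chunk of the equal split is v = donations // num,
--     so the filtered/scaled sum is either factor * v * num or 0."""
--     rec = donors_amts[donor]
--     num = rec['num_of_donations']
--     v = rec['donations'] // num
--     if contrib_ceiling:
--         return factor * v * num if v < contrib_ceiling else 0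
--     elif contrib_floor:
--         return factor * v * num if v >= contrib_floor else 0
-- ===== Notes on version B (the rewrite author's own statement) =====
-- stated objective: simpler
-- what changed: Replaces the factor_list/donations list construction plus map/filter/sum with a closed form: since every chunk of the equal split equals v = donations // num, the branch returns factor * v * num when the filter keeps the chunks and 0 otherwise.
import Mathlib
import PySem

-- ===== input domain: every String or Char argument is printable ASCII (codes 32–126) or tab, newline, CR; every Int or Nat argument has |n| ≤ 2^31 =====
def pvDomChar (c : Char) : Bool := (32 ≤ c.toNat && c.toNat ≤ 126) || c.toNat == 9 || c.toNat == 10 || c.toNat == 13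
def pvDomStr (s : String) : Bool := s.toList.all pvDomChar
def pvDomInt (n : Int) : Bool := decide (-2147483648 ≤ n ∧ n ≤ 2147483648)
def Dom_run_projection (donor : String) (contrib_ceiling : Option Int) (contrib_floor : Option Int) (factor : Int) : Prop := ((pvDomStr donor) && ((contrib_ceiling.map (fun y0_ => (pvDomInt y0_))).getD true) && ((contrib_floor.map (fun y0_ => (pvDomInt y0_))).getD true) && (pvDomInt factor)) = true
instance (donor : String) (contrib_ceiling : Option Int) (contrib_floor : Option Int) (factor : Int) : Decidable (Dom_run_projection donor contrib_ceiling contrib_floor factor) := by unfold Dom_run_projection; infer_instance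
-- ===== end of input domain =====

-- B replaces A's list building + map/filter/sum with the closed form factor*v*num (objective: simpler).

-- ===== PORT A =====
-- the module-level donors_amts dict, restricted to the two integer fields A reads: (donations, num_of_donations)
def donorsAmts : List (String × (Int × Int)) :=
  [("Gates", (150000, 3)), ("Brin", (150000, 3)), ("Cerf", (50000, 2)),
   ("Musk", (100000, 1)), ("Berners-Lee", (50000, 2)), ("Wojcicki", (125000, 1)),
   ("Avey", (200000, 2))]

def challenge (donations : Int) (factor : Int) : Int := donations * factor

-- Python truthiness of an int-or-None value (None and 0 are falsy)
def pyTruthy : Option Int → Bool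
  | none => false
  | some c => c != 0

def run_projection (donor : String) (contrib_ceiling : Option Int) (contrib_floor : Option Int) (factor : Int) : Option Int :=
  match (PySem.Dict.mk donorsAmts).get? donor with
  | none => none   -- KeyError in Python; excluded by Pre_
  | some (don, num) =>
    let factor_list : List Int := (PySem.List.pyRange 0 num 1).map (fun _ => factor)
    let donations : List Int := factor_list.map (fun _ => PySem.Int.floordiv don (factor_list.length : Int))
    if pyTruthy contrib_ceiling then
      some ((List.zipWith challenge factor_list
              (donations.filter (fun x => x < contrib_ceiling.getD 0))).sum)
    else if pyTruthy contrib_floor then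
      some ((List.zipWith challenge factor_list
              (donations.filter (fun x => x ≥ contrib_floor.getD 0))).sum)
    else none

-- ===== PORT B =====
def run_projection_alt (donor : String) (contrib_ceiling : Option Int) (contrib_floor : Option Int) (factor : Int) : Option Int :=
  match (PySem.Dict.mk donorsAmts).get? donor with
  | none => none   -- KeyError in Python; excluded by Pre_
  | some (don, num) =>
    let v := PySem.Int.floordiv don num
    if pyTruthy contrib_ceiling then
      some (if v < contrib_ceiling.getD 0 then factor * v * num else 0)
    else if pyTruthy contrib_floor then
      some (if v ≥ contrib_floor.getD 0 then factor * v * num else 0)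
    else none

-- ===== PRECONDITION & SPEC =====
-- Pre_ excludes unknown donors, on which Python A raises KeyError.
def Pre_run_projection (donor : String) (contrib_ceiling : Option Int) (contrib_floor : Option Int) (factor : Int) : Prop :=
  donor = "Gates" ∨ donor = "Brin" ∨ donor = "Cerf" ∨ donor = "Musk" ∨
  donor = "Berners-Lee" ∨ donor = "Wojcicki" ∨ donor = "Avey"
instance (donor : String) (contrib_ceiling : Option Int) (contrib_floor : Option Int) (factor : Int) : Decidable (Pre_run_projection donor contrib_ceiling contrib_floor factor) := by unfold Pre_run_projection; infer_instance

def pvWitness_run_projection : String × Option Int × Option Int × Int := ("Gates", some 60000, none, 2)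

def Spec_run_projection (donor : String) (contrib_ceiling : Option Int) (contrib_floor : Option Int) (factor : Int) (out : Option Int) : Prop := out = run_projection_alt donor contrib_ceiling contrib_floor factor
instance (donor : String) (contrib_ceiling : Option Int) (contrib_floor : Option Int) (factor : Int) (out : Option Int) : Decidable (Spec_run_projection donor contrib_ceiling contrib_floor factor out) := by unfold Spec_run_projection; infer_instance

-- ===== CLAIM (what is proved, stated in full; the proofs are below) =====
def Claim_equal_run_projection : Prop := ∀ (donor : String) (contrib_ceiling : Option Int) (contrib_floor : Option Int) (factor : Int), Dom_run_projection donor contrib_ceiling contrib_floor factor → Pre_run_projection donor contrib_ceiling contrib_floor factor → Spec_run_projection donor contrib_ceiling contrib_floor factor (run_projection donor contrib_ceiling contrib_floor factor)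

-- ===== LEMMAS AND PROOFS =====
lemma pvLk1 : (PySem.Dict.mk donorsAmts).get? "Gates" = some (150000, 3) := by decide
lemma pvLk2 : (PySem.Dict.mk donorsAmts).get? "Brin" = some (150000, 3) := by decide
lemma pvLk3 : (PySem.Dict.mk donorsAmts).get? "Cerf" = some (50000, 2) := by decide
lemma pvLk4 : (PySem.Dict.mk donorsAmts).get? "Musk" = some (100000, 1) := by decide
lemma pvLk5 : (PySem.Dict.mk donorsAmts).get? "Berners-Lee" = some (50000, 2) := by decide
lemma pvLk6 : (PySem.Dict.mk donorsAmts).get? "Wojcicki" = some (125000, 1) := by decide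
lemma pvLk7 : (PySem.Dict.mk donorsAmts).get? "Avey" = some (200000, 2) := by decide
lemma pvPr1 : PySem.List.pyRange 0 1 1 = [0] := by decide
lemma pvPr2 : PySem.List.pyRange 0 2 1 = [0, 1] := by decide
lemma pvPr3 : PySem.List.pyRange 0 3 1 = [0, 1, 2] := by decide
lemma pvFd1 : PySem.Int.floordiv 150000 3 = 50000 := by decide
lemma pvFd2 : PySem.Int.floordiv 50000 2 = 25000 := by decide
lemma pvFd3 : PySem.Int.floordiv 100000 1 = 100000 := by decide
lemma pvFd4 : PySem.Int.floordiv 125000 1 = 125000 := by decide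
lemma pvFd5 : PySem.Int.floordiv 200000 2 = 100000 := by decide

lemma pvFil1 (q : Int → Bool) (v : Int) : [v].filter q = if q v then [v] else [] := by
  by_cases h : q v <;> simp [List.filter, h]
lemma pvFil2 (q : Int → Bool) (v : Int) : [v, v].filter q = if q v then [v, v] else [] := by
  by_cases h : q v <;> simp [List.filter, h]
lemma pvFil3 (q : Int → Bool) (v : Int) : [v, v, v].filter q = if q v then [v, v, v] else [] := by
  by_cases h : q v <;> simp [List.filter, h]

-- ===== VERDICT (by name: the statement is the Claim_ definition above) =====
set_option maxHeartbeats 1600000 in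
theorem run_projection_spec : Claim_equal_run_projection := by
  intro donor cc cf factor _ hpre
  unfold Spec_run_projection
  unfold Pre_run_projection at hpre
  rcases hpre with h | h | h | h | h | h | h <;> subst h <;>
    rcases cc with _ | c <;> rcases cf with _ | d <;>
    simp only [run_projection, run_projection_alt, pyTruthy,
               pvLk1, pvLk2, pvLk3, pvLk4, pvLk5, pvLk6, pvLk7,
               pvPr1, pvPr2, pvPr3, List.map_cons, List.map_nil,
               List.length_cons, List.length_nil] <;>
    norm_num [pvFd1, pvFd2, pvFd3, pvFd4, pvFd5, pvFil1, pvFil2, pvFil3] <;>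
    split_ifs <;>
    simp_all [List.zipWith, challenge] <;> omega
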